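-- pv_equiv track=rewrite | github.com/supmathews/PDF2QA-API | pdf2qa-api.py | remove_qa_prefix
-- ===== SOURCE A (Python) =====
-- def remove_qa_prefix(text: str) -> str:
--     # Initialise the index at end of text
--     first_occurance_index = len(text)
--
--     delimiters = ['.', '-', ':']
--
--     # Finding the index of the first occurrence of any delimiter
--     for delimiter in delimiters:
--         index = text.find(delimiter)
--         if index != -1 and index < first_occurance_index:
--             first_occurance_index = index
--
--     # Return the clean string
--     return text[first_occurance_index+1:].strip()
-- ===== SOURCE B (Python) =====
-- def remove_qa_prefix(text: str) -> str:
--     # Single pass: cut at the first '.', '-' or ':' seen; no delimiter -> ''.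
--     for i, ch in enumerate(text):
--         if ch in '.-:':
--             return text[i + 1:].strip()
--     return ''
-- ===== Notes on version B (the rewrite author's own statement) =====
-- stated objective: idiomatic
-- what changed: B scans the text once with enumerate and cuts at the first delimiter character, instead of A's three separate str.find passes combined by a running minimum.
import Mathlib
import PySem

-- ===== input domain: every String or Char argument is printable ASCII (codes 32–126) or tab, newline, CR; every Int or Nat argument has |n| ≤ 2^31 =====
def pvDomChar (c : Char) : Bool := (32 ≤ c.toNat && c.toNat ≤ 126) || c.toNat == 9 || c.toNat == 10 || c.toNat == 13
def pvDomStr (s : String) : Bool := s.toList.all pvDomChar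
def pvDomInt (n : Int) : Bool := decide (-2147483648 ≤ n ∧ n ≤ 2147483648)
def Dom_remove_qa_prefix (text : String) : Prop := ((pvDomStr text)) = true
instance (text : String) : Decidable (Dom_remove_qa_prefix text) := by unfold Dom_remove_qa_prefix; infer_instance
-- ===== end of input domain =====

-- B replaces A's three separate str.find scans (combined by a running minimum) with one
-- left-to-right pass that cuts at the first delimiter character; same result, more idiomatic.

-- ===== PORT A =====
def remove_qa_prefix (text : String) : String :=
  let first_occurance_index : Int := PySem.Str.len text
  let delimiters : List String := [".", "-", ":"]
  let fi := delimiters.foldl (fun cur delimiter =>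
    let index := PySem.Str.find text delimiter
    if index ≠ -1 ∧ index < cur then index else cur) first_occurance_index
  PySem.Str.strip (PySem.Str.slice text (some (fi + 1)) none)

-- ===== PORT B =====
-- 'for i, ch in enumerate(text): if ch in ".-:": return …' — first index holding a delimiter
def altFirst : List Char → Option Nat
  | [] => none
  | c :: cs => if c = '.' ∨ c = '-' ∨ c = ':' then some 0 else (altFirst cs).map (· + 1)

def remove_qa_prefix_alt (text : String) : String :=
  match altFirst text.toList with
  | some i => PySem.Str.strip (PySem.Str.slice text (some ((i : Int) + 1)) none)
  | none => ""

-- ===== PRECONDITION & SPEC =====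
def Spec_remove_qa_prefix (text : String) (out : String) : Prop := out = remove_qa_prefix_alt text
instance (text : String) (out : String) : Decidable (Spec_remove_qa_prefix text out) := by unfold Spec_remove_qa_prefix; infer_instance

-- ===== CLAIM (what is proved, stated in full; the proofs are below) =====
def Claim_equal_remove_qa_prefix : Prop := ∀ (text : String), Dom_remove_qa_prefix text → Spec_remove_qa_prefix text (remove_qa_prefix text)

-- ===== LEMMAS AND PROOFS =====

-- if d occurs in L then its index, else -1 : what text.find(d) computes for a single char
def gIdx (L : List Char) (d : Char) : Int := if d ∈ L then (L.idxOf d : Int) else -1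

-- one iteration of A's running-minimum loop
def aStep (cur a : Int) : Int := if a ≠ -1 ∧ a < cur then a else cur

-- A's first_occurance_index after the three-delimiter loop, in gIdx form
def aIdx (L : List Char) : Int :=
  aStep (aStep (aStep (L.length : Int) (gIdx L '.')) (gIdx L '-')) (gIdx L ':')

theorem singleton_prefix_drop {L : List Char} {d : Char} {i : Nat} :
    [d] <+: L.drop i ↔ L[i]? = some d := by
  rw [List.cons_prefix_iff]
  constructor
  · rintro ⟨l', h, -⟩
    have := congrArg List.head? h
    simpa [List.head?_drop] using this
  · intro h
    have hh : (L.drop i).head? = some d := by simpa [List.head?_drop] using h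
    cases hdrop : L.drop i with
    | nil => simp [hdrop] at hh
    | cons a t =>
      simp [hdrop] at hh
      exact ⟨t, by simp [hdrop, hh], by simp⟩

theorem idxOf_le_of_getElem {L : List Char} {d : Char} {k : Nat}
    (h : k < L.length) (he : L[k] = d) : L.idxOf d ≤ k := by
  induction L generalizing k with
  | nil => simp at h
  | cons c cs ih =>
    cases k with
    | zero =>
      simp at he
      simp [List.idxOf_cons, he]
    | succ k =>
      simp at he
      rw [List.idxOf_cons]
      cases hcd : c == d with
      | true => simp
      | false =>
        simp only [cond_false]
        have := ih (k := k) (by simpa using h) he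
        omega

-- text.find(d) for a one-character needle is the index of d's first occurrence, or -1
theorem find_singleton (L : List Char) (d : Char) :
    PySem.Chars.find L [d] = gIdx L d := by
  unfold gIdx
  by_cases hm : d ∈ L
  · have hinf : [d] <:+: L := by
      obtain ⟨s, t, rfl⟩ := List.append_of_mem hm
      exact ⟨s, t, by simp⟩
    have h0 : 0 ≤ PySem.Chars.find L [d] := (PySem.Chars.find_nonneg_iff L [d]).mpr hinf
    obtain ⟨hpre, hmin⟩ := PySem.Chars.find_spec h0
    set k := (PySem.Chars.find L [d]).toNat with hk
    have hget : L[k]? = some d := singleton_prefix_drop.mp hpre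
    have hklt : k < L.length := by
      by_contra hc
      rw [List.getElem?_eq_none (le_of_not_gt hc)] at hget
      exact absurd hget (by simp)
    have hgk : L[k] = d := by
      have := List.getElem?_eq_getElem hklt
      rw [this] at hget; exact Option.some.inj hget
    have h1 : L.idxOf d ≤ k := idxOf_le_of_getElem hklt hgk
    have hlt : L.idxOf d < L.length := List.idxOf_lt_length_iff.mpr hm
    have h2 : ¬ L.idxOf d < k := by
      intro hc
      exact hmin _ hc (singleton_prefix_drop.mpr
        (by rw [List.getElem?_eq_getElem hlt, List.getElem_idxOf hlt]))
    have hik : L.idxOf d = k := by omega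
    simp only [if_pos hm, hik, hk]
    omega
  · have hni : ¬ [d] <:+: L := by
      intro h
      exact hm (h.mem (by simp))
    simp [hm, (PySem.Chars.find_eq_neg_one_iff L [d]).mpr hni]

theorem gIdx_ge_neg_one (L : List Char) (d : Char) : -1 ≤ gIdx L d := by
  unfold gIdx; split_ifs with h
  · have := Int.natCast_nonneg (L.idxOf d); omega
  · exact le_refl (-1)

theorem gIdx_lt_length {L : List Char} {d : Char} (h : gIdx L d ≠ -1) :
    gIdx L d < (L.length : Int) := by
  unfold gIdx at *
  split_ifs at * with hm
  · exact_mod_cast List.idxOf_lt_length_iff.mpr hm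
  · omega

theorem gIdx_cons_ne {c : Char} {cs : List Char} {d : Char} (h : c ≠ d) :
    gIdx (c :: cs) d = if gIdx cs d = -1 then -1 else gIdx cs d + 1 := by
  have hbd : (c == d) = false := by simpa using h
  by_cases hm : d ∈ cs
  · have hnn : (0 : Int) ≤ (cs.idxOf d : Int) := Int.natCast_nonneg _
    simp only [gIdx, List.idxOf_cons, hbd, cond_false]
    rw [if_pos (by simp [hm]), if_pos hm, if_neg (by omega)]
    push_cast; ring
  · simp only [gIdx]
    rw [if_neg (by simp [hm]; exact fun e => h e.symm), if_neg hm]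
    simp

theorem gIdx_cons_self (c : Char) (cs : List Char) : gIdx (c :: cs) c = 0 := by
  simp [gIdx, List.idxOf_cons]

theorem aStep_shift (cur a : Int) (ha : -1 ≤ a) :
    aStep (cur + 1) (if a = -1 then -1 else a + 1) = aStep cur a + 1 := by
  unfold aStep; split_ifs <;> omega

theorem aIdx_cons_ne {c : Char} {cs : List Char}
    (h1 : c ≠ '.') (h2 : c ≠ '-') (h3 : c ≠ ':') :
    aIdx (c :: cs) = aIdx cs + 1 := by
  unfold aIdx
  rw [gIdx_cons_ne h1, gIdx_cons_ne h2, gIdx_cons_ne h3]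
  have l1 := gIdx_ge_neg_one cs '.'
  have l2 := gIdx_ge_neg_one cs '-'
  have l3 := gIdx_ge_neg_one cs ':'
  have hc : ((c :: cs).length : Int) = (cs.length : Int) + 1 := by push_cast [List.length_cons]; ring
  rw [hc, aStep_shift _ _ l1, aStep_shift _ _ l2, aStep_shift _ _ l3]

theorem aIdx_cons_delim {c : Char} {cs : List Char} (hc : c = '.' ∨ c = '-' ∨ c = ':') :
    aIdx (c :: cs) = 0 := by
  have hz : gIdx (c :: cs) '.' = 0 ∨ gIdx (c :: cs) '-' = 0 ∨ gIdx (c :: cs) ':' = 0 := by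
    rcases hc with rfl | rfl | rfl
    · exact Or.inl (gIdx_cons_self _ _)
    · exact Or.inr (Or.inl (gIdx_cons_self _ _))
    · exact Or.inr (Or.inr (gIdx_cons_self _ _))
  have hdesc : ∀ d : Char, gIdx (c :: cs) d = -1 ∨
      (0 ≤ gIdx (c :: cs) d ∧ gIdx (c :: cs) d < ((c :: cs).length : Int)) := by
    intro d
    rcases eq_or_ne (gIdx (c :: cs) d) (-1) with he | he
    · exact Or.inl he
    · exact Or.inr ⟨by have := gIdx_ge_neg_one (c :: cs) d; omega, gIdx_lt_length he⟩
  have h1 := hdesc '.'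
  have h2 := hdesc '-'
  have h3 := hdesc ':'
  have hlen : (0 : Int) < ((c :: cs).length : Int) := by exact_mod_cast Nat.succ_pos cs.length
  unfold aIdx aStep
  split_ifs <;> omega

-- the heart of the equivalence: A's running-minimum index is B's first-delimiter scan
theorem aIdx_eq_altFirst (L : List Char) :
    aIdx L = (match altFirst L with
              | some i => (i : Int)
              | none => (L.length : Int)) := by
  induction L with
  | nil => decide
  | cons c cs ih =>
    by_cases hc : c = '.' ∨ c = '-' ∨ c = ':'
    · rw [aIdx_cons_delim hc]
      simp [altFirst, hc]
    · push_neg at hc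
      obtain ⟨h1, h2, h3⟩ := hc
      rw [aIdx_cons_ne h1 h2 h3, ih]
      have hne : ¬ (c = '.' ∨ c = '-' ∨ c = ':') := by tauto
      simp only [altFirst, if_neg hne]
      cases hfa : altFirst cs with
      | none => simp [List.length_cons]
      | some i => simp

theorem toList_singleton_dot : ("." : String).toList = ['.'] := rfl
theorem toList_singleton_dash : ("-" : String).toList = ['-'] := rfl
theorem toList_singleton_colon : (":" : String).toList = [':'] := rfl

-- A's folded loop, written out and expressed through gIdx
theorem remove_qa_prefix_eq_aIdx (text : String) :
    remove_qa_prefix text =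
      PySem.Str.strip (PySem.Str.slice text (some (aIdx text.toList + 1)) none) := by
  unfold remove_qa_prefix aIdx aStep
  simp only [List.foldl, PySem.Str.find_eq, PySem.Str.len_eq,
    toList_singleton_dot, toList_singleton_dash, toList_singleton_colon,
    find_singleton]

-- ===== VERDICT (by name: the statement is the Claim_ definition above) =====
theorem remove_qa_prefix_spec : Claim_equal_remove_qa_prefix := by
  intro text _
  unfold Spec_remove_qa_prefix
  rw [remove_qa_prefix_eq_aIdx, remove_qa_prefix_alt]
  rw [aIdx_eq_altFirst]
  cases hfa : altFirst text.toList with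
  | some i => simp
  | none =>
    simp only
    apply String.toList_inj.mp
    rw [PySem.Str.toList_strip, PySem.Str.toList_slice, PySem.Chars.slice_eq_listSlice]
    rw [show ((text.toList.length : Int) + 1) = ((text.toList.length + 1 : Nat) : Int) by push_cast; ring]
    rw [PySem.List.slice_from_natCast, List.drop_eq_nil_of_le (by omega)]
    rfl
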